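-- pv_equiv track=rewrite | github.com/temanisyarat/model-pipeline | src/data.py | split_by_signers
-- ===== SOURCE A (Python) =====
-- def split_by_signers(paths, labels, signer_ids, val_signers):
--     """Split data by signers (leave-one-signer-out)."""
--     train_paths, train_labels, train_signers = [], [], []
--     val_paths, val_labels, val_signers_list = [], [], []
--
--     for path, label, sid in zip(paths, labels, signer_ids):
--         if sid in val_signers:
--             val_paths.append(path)
--             val_labels.append(label)
--             val_signers_list.append(sid)
--         else:
--             train_paths.append(path)
--             train_labels.append(label)
--             train_signers.append(sid)
--
--     return train_paths, train_labels, train_signers, val_paths, val_labels, val_signers_list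
-- ===== SOURCE B (Python) =====
-- def _select(xs, keep, flag):
--     """Elements of xs whose membership mark equals flag (zip truncates)."""
--     return [x for x, m in zip(xs, keep) if m == flag]
--
--
-- def split_by_signers(paths, labels, signer_ids, val_signers):
--     """Split data by signers (leave-one-signer-out)."""
--     # one membership pass over the zipped triples (truncates like A's zip)
--     keep = [sid in val_signers for _, _, sid in zip(paths, labels, signer_ids)]
--     return (
--         _select(paths, keep, False),
--         _select(labels, keep, False),
--         _select(signer_ids, keep, False),
--         _select(paths, keep, True),
--         _select(labels, keep, True),
--         _select(signer_ids, keep, True),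
--     )
-- ===== Notes on version B (the rewrite author's own statement) =====
-- stated objective: alternative
-- what changed: Replaces the single fused six-append loop with a precomputed boolean membership mask over the zipped triples plus six mask-driven filter passes.
import Mathlib
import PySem

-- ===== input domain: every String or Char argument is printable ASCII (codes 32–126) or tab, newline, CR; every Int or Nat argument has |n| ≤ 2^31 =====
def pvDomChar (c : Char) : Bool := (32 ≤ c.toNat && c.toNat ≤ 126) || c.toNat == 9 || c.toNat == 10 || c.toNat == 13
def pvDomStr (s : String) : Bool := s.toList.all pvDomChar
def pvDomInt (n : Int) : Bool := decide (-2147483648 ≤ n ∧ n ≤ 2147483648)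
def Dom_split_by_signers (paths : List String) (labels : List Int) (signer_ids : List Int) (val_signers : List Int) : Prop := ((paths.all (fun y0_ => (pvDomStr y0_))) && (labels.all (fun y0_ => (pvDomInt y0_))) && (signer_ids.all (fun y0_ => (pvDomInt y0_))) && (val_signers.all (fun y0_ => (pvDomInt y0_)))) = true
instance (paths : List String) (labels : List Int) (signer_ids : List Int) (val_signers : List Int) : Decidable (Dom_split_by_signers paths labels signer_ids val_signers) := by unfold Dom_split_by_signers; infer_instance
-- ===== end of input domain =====

-- B replaces A's fused six-append loop by a precomputed membership mask plus six filter passes (alternative decomposition, same cost).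

-- ===== PORT A =====
-- the for-loop over zip(paths, labels, signer_ids) with its six accumulators
def splitLoopA (l : List (String × Int × Int)) (vs : List Int)
    (tp : List String) (tl ts : List Int) (vp : List String) (vl vsl : List Int) :
    List String × List Int × List Int × List String × List Int × List Int :=
  match l with
  | [] => (tp, tl, ts, vp, vl, vsl)
  | (p, lab, sid) :: rest =>
    if vs.contains sid then
      splitLoopA rest vs tp tl ts (vp ++ [p]) (vl ++ [lab]) (vsl ++ [sid])
    else
      splitLoopA rest vs (tp ++ [p]) (tl ++ [lab]) (ts ++ [sid]) vp vl vsl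

def split_by_signers (paths : List String) (labels : List Int) (signer_ids : List Int) (val_signers : List Int) : List String × List Int × List Int × List String × List Int × List Int :=
  splitLoopA (paths.zip (labels.zip signer_ids)) val_signers [] [] [] [] [] []

-- ===== PORT B =====
-- [x for x, m in zip(xs, keep) if m == flag]
def selectBy {α : Type} (xs : List α) (keep : List Bool) (flag : Bool) : List α :=
  (xs.zip keep).filterMap (fun q => if q.2 = flag then some q.1 else none)

-- keep = [sid in val_signers for _, _, sid in zip(paths, labels, signer_ids)]
def keepMask (paths : List String) (labels : List Int) (signer_ids : List Int) (val_signers : List Int) : List Bool :=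
  (paths.zip (labels.zip signer_ids)).map (fun t => val_signers.contains t.2.2)

def split_by_signers_alt (paths : List String) (labels : List Int) (signer_ids : List Int) (val_signers : List Int) : List String × List Int × List Int × List String × List Int × List Int :=
  let keep := keepMask paths labels signer_ids val_signers
  (selectBy paths keep false, selectBy labels keep false, selectBy signer_ids keep false,
   selectBy paths keep true, selectBy labels keep true, selectBy signer_ids keep true)

-- ===== PRECONDITION & SPEC =====
def Spec_split_by_signers (paths : List String) (labels : List Int) (signer_ids : List Int) (val_signers : List Int) (out : List String × List Int × List Int × List String × List Int × List Int) : Prop := out = split_by_signers_alt paths labels signer_ids val_signers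
instance (paths : List String) (labels : List Int) (signer_ids : List Int) (val_signers : List Int) (out : List String × List Int × List Int × List String × List Int × List Int) : Decidable (Spec_split_by_signers paths labels signer_ids val_signers out) := by unfold Spec_split_by_signers; infer_instance

-- ===== CLAIM (what is proved, stated in full; the proofs are below) =====
def Claim_equal_split_by_signers : Prop := ∀ (paths : List String) (labels : List Int) (signer_ids : List Int) (val_signers : List Int), Dom_split_by_signers paths labels signer_ids val_signers → Spec_split_by_signers paths labels signer_ids val_signers (split_by_signers paths labels signer_ids val_signers)

-- ===== LEMMAS AND PROOFS =====
lemma splitLoopA_eq (ps : List String) (ls ss vs : List Int) :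
    ∀ (tp : List String) (tl ts : List Int) (vp : List String) (vl vsl : List Int),
    splitLoopA (ps.zip (ls.zip ss)) vs tp tl ts vp vl vsl =
      (tp ++ selectBy ps (keepMask ps ls ss vs) false,
       tl ++ selectBy ls (keepMask ps ls ss vs) false,
       ts ++ selectBy ss (keepMask ps ls ss vs) false,
       vp ++ selectBy ps (keepMask ps ls ss vs) true,
       vl ++ selectBy ls (keepMask ps ls ss vs) true,
       vsl ++ selectBy ss (keepMask ps ls ss vs) true) := by
  induction ps generalizing ls ss with
  | nil =>
    intro tp tl ts vp vl vsl
    simp [splitLoopA, keepMask, selectBy]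
  | cons p ps ih =>
    intro tp tl ts vp vl vsl
    match ls, ss with
    | [], _ => simp [splitLoopA, keepMask, selectBy]
    | _ :: _, [] => simp [splitLoopA, keepMask, selectBy]
    | lab :: ls, sid :: ss =>
      by_cases h : sid ∈ vs
      · simp [splitLoopA, keepMask, selectBy, h, ih]
      · simp [splitLoopA, keepMask, selectBy, h, ih]

-- ===== VERDICT (by name: the statement is the Claim_ definition above) =====
theorem split_by_signers_spec : Claim_equal_split_by_signers := by
  intro paths labels signer_ids val_signers _
  unfold Spec_split_by_signers split_by_signers split_by_signers_alt
  simp [splitLoopA_eq]
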